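-- pv_equiv track=rewrite | github.com/Silverhorse7/IPC | Scrappers/uva/solutions_collector.py | generate_problem_link
-- ===== SOURCE A (Python) =====
-- def generate_problem_link(problem_id):
--     ranges = [
--         (100, 199), (200, 299), (300, 399), (400, 499),
--         (500, 599), (600, 699), (700, 799), (800, 899),
--         (900, 999), (1000, 1099), (1100, 1199), (1200, 1299),
--         (1300, 1399), (1400, 1499), (1500, 1599), (1600, 1699),
--         (1700, 1799)
--     ]
--     for idx, (start, end) in enumerate(ranges, start=1):
--         if start <= problem_id <= end:
--             return f'https://onlinejudge.org/external/{idx}/{problem_id}.pdf'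
--     return None
-- ===== SOURCE B (Python) =====
-- def generate_problem_link(problem_id):
--     idx = problem_id // 100
--     if 1 <= idx <= 17:
--         return f'https://onlinejudge.org/external/{idx}/{problem_id}.pdf'
--     return None
-- ===== Notes on version B (the rewrite author's own statement) =====
-- stated objective: simpler
-- what changed: Replaced the lookup table of ranges and the linear enumerate-scan over it with a closed-form bucket computation (floor-divide the id by the bucket width, then a single range guard).
import Mathlib
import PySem

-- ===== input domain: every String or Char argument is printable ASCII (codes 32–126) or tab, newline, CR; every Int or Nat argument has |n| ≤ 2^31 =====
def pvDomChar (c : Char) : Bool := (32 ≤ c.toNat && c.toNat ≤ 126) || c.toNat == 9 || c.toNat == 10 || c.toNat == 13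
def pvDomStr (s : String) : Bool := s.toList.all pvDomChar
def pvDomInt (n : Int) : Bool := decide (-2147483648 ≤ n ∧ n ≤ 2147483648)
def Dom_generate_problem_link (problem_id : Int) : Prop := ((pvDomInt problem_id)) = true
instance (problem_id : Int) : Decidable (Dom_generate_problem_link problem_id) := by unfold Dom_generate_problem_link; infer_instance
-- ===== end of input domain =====

-- ===== PORT A =====
-- header: B replaces A's 17-entry ranges table and linear scan with a closed-form bucket
-- computation (idx = problem_id // 100); objective: simpler. Return values agree everywhere.
def gplRanges : List (Int × Int) :=
  [(100, 199), (200, 299), (300, 399), (400, 499),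
   (500, 599), (600, 699), (700, 799), (800, 899),
   (900, 999), (1000, 1099), (1100, 1199), (1200, 1299),
   (1300, 1399), (1400, 1499), (1500, 1599), (1600, 1699),
   (1700, 1799)]

-- the 'for idx, (start, end) in enumerate(ranges, 1): if ... return' loop
def gplLoop (problem_id : Int) : List (Int × (Int × Int)) → Option String
  | [] => none
  | (idx, se) :: rest =>
    if se.1 ≤ problem_id ∧ problem_id ≤ se.2 then
      some ("https://onlinejudge.org/external/" ++ PySem.Int.toStr idx ++ "/" ++
            PySem.Int.toStr problem_id ++ ".pdf")
    else gplLoop problem_id rest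

def generate_problem_link (problem_id : Int) : Option String :=
  gplLoop problem_id (PySem.List.enumerate gplRanges 1)

-- ===== PORT B =====
def generate_problem_link_alt (problem_id : Int) : Option String :=
  let idx := PySem.Int.floordiv problem_id 100
  if 1 ≤ idx ∧ idx ≤ 17 then
    some ("https://onlinejudge.org/external/" ++ PySem.Int.toStr idx ++ "/" ++
          PySem.Int.toStr problem_id ++ ".pdf")
  else none

-- ===== PRECONDITION & SPEC =====
def Spec_generate_problem_link (problem_id : Int) (out : Option String) : Prop := out = generate_problem_link_alt problem_id
instance (problem_id : Int) (out : Option String) : Decidable (Spec_generate_problem_link problem_id out) := by unfold Spec_generate_problem_link; infer_instance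

-- ===== CLAIM (what is proved, stated in full; the proofs are below) =====
def Claim_equal_generate_problem_link : Prop := ∀ (problem_id : Int), Dom_generate_problem_link problem_id → Spec_generate_problem_link problem_id (generate_problem_link problem_id)

-- ===== LEMMAS AND PROOFS =====
theorem gpl_floordiv_eq (n q : Int) (h1 : q * 100 ≤ n) (h2 : n < (q + 1) * 100) :
    PySem.Int.floordiv n 100 = q :=
  (PySem.Int.floordiv_eq_iff_of_pos (by norm_num)).2 ⟨h1, h2⟩

theorem gpl_alt_some (n q : Int) (h1 : q * 100 ≤ n) (h2 : n < (q + 1) * 100)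
    (h3 : 1 ≤ q) (h4 : q ≤ 17) :
    generate_problem_link_alt n =
      some ("https://onlinejudge.org/external/" ++ PySem.Int.toStr q ++ "/" ++
            PySem.Int.toStr n ++ ".pdf") := by
  unfold generate_problem_link_alt
  rw [gpl_floordiv_eq n q h1 h2, if_pos ⟨h3, h4⟩]

theorem gpl_alt_none (n : Int) (h : n < 100 ∨ 1800 ≤ n) :
    generate_problem_link_alt n = none := by
  unfold generate_problem_link_alt
  have hq := (PySem.Int.floordiv_eq_iff_of_pos (a := n) (b := 100)
    (q := PySem.Int.floordiv n 100) (by norm_num)).1 rfl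
  rw [if_neg]
  omega

theorem gpl_enum :
    PySem.List.enumerate gplRanges 1 =
      [(1,(100,199)), (2,(200,299)), (3,(300,399)), (4,(400,499)),
       (5,(500,599)), (6,(600,699)), (7,(700,799)), (8,(800,899)),
       (9,(900,999)), (10,(1000,1099)), (11,(1100,1199)), (12,(1200,1299)),
       (13,(1300,1399)), (14,(1400,1499)), (15,(1500,1599)), (16,(1600,1699)),
       (17,(1700,1799))] := by
  norm_num [gplRanges, PySem.List.enumerate_cons, PySem.List.enumerate_nil]

set_option maxHeartbeats 1000000 in
-- ===== VERDICT (by name: the statement is the Claim_ definition above) =====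
theorem generate_problem_link_spec : Claim_equal_generate_problem_link := by
  intro n _
  unfold Spec_generate_problem_link generate_problem_link
  rw [gpl_enum]
  simp only [gplLoop]
  by_cases h1 : (100:Int) ≤ n ∧ n ≤ 199
  · rw [if_pos h1]
    exact (gpl_alt_some n 1 (by omega) (by omega) (by norm_num) (by norm_num)).symm
  rw [if_neg h1]
  by_cases h2 : (200:Int) ≤ n ∧ n ≤ 299
  · rw [if_pos h2]
    exact (gpl_alt_some n 2 (by omega) (by omega) (by norm_num) (by norm_num)).symm
  rw [if_neg h2]
  by_cases h3 : (300:Int) ≤ n ∧ n ≤ 399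
  · rw [if_pos h3]
    exact (gpl_alt_some n 3 (by omega) (by omega) (by norm_num) (by norm_num)).symm
  rw [if_neg h3]
  by_cases h4 : (400:Int) ≤ n ∧ n ≤ 499
  · rw [if_pos h4]
    exact (gpl_alt_some n 4 (by omega) (by omega) (by norm_num) (by norm_num)).symm
  rw [if_neg h4]
  by_cases h5 : (500:Int) ≤ n ∧ n ≤ 599
  · rw [if_pos h5]
    exact (gpl_alt_some n 5 (by omega) (by omega) (by norm_num) (by norm_num)).symm
  rw [if_neg h5]
  by_cases h6 : (600:Int) ≤ n ∧ n ≤ 699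
  · rw [if_pos h6]
    exact (gpl_alt_some n 6 (by omega) (by omega) (by norm_num) (by norm_num)).symm
  rw [if_neg h6]
  by_cases h7 : (700:Int) ≤ n ∧ n ≤ 799
  · rw [if_pos h7]
    exact (gpl_alt_some n 7 (by omega) (by omega) (by norm_num) (by norm_num)).symm
  rw [if_neg h7]
  by_cases h8 : (800:Int) ≤ n ∧ n ≤ 899
  · rw [if_pos h8]
    exact (gpl_alt_some n 8 (by omega) (by omega) (by norm_num) (by norm_num)).symm
  rw [if_neg h8]
  by_cases h9 : (900:Int) ≤ n ∧ n ≤ 999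
  · rw [if_pos h9]
    exact (gpl_alt_some n 9 (by omega) (by omega) (by norm_num) (by norm_num)).symm
  rw [if_neg h9]
  by_cases h10 : (1000:Int) ≤ n ∧ n ≤ 1099
  · rw [if_pos h10]
    exact (gpl_alt_some n 10 (by omega) (by omega) (by norm_num) (by norm_num)).symm
  rw [if_neg h10]
  by_cases h11 : (1100:Int) ≤ n ∧ n ≤ 1199
  · rw [if_pos h11]
    exact (gpl_alt_some n 11 (by omega) (by omega) (by norm_num) (by norm_num)).symm
  rw [if_neg h11]
  by_cases h12 : (1200:Int) ≤ n ∧ n ≤ 1299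
  · rw [if_pos h12]
    exact (gpl_alt_some n 12 (by omega) (by omega) (by norm_num) (by norm_num)).symm
  rw [if_neg h12]
  by_cases h13 : (1300:Int) ≤ n ∧ n ≤ 1399
  · rw [if_pos h13]
    exact (gpl_alt_some n 13 (by omega) (by omega) (by norm_num) (by norm_num)).symm
  rw [if_neg h13]
  by_cases h14 : (1400:Int) ≤ n ∧ n ≤ 1499
  · rw [if_pos h14]
    exact (gpl_alt_some n 14 (by omega) (by omega) (by norm_num) (by norm_num)).symm
  rw [if_neg h14]
  by_cases h15 : (1500:Int) ≤ n ∧ n ≤ 1599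
  · rw [if_pos h15]
    exact (gpl_alt_some n 15 (by omega) (by omega) (by norm_num) (by norm_num)).symm
  rw [if_neg h15]
  by_cases h16 : (1600:Int) ≤ n ∧ n ≤ 1699
  · rw [if_pos h16]
    exact (gpl_alt_some n 16 (by omega) (by omega) (by norm_num) (by norm_num)).symm
  rw [if_neg h16]
  by_cases h17 : (1700:Int) ≤ n ∧ n ≤ 1799
  · rw [if_pos h17]
    exact (gpl_alt_some n 17 (by omega) (by omega) (by norm_num) (by norm_num)).symm
  rw [if_neg h17]
  exact (gpl_alt_none n (by omega)).symm
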